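-- pv_equiv track=rewrite | github.com/farmobile/norm | norm.py | _add_new_key
-- ===== SOURCE A (Python) =====
-- def _add_new_key(to_data, from_data, name, to_key):
--     for to_id in to_data:
--         keys = []
--         for from_id in from_data:
--             if to_key in from_data[from_id]:
--                 if from_data[from_id][to_key] == to_id:
--                     keys.append(from_id)
--         to_data[to_id][name] = keys
--
--     return to_data
-- ===== SOURCE B (Python) =====
-- def _add_new_key(to_data, from_data, name, to_key):
--     pairs = [(d[to_key], fid) for fid, d in from_data.items() if to_key in d]
--     groups = {}
--     for v, fid in pairs:
--         groups.setdefault(v, []).append(fid)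
--     for to_id, d in to_data.items():
--         d[name] = groups.get(to_id, [])
--     return to_data
-- ===== Notes on version B (the rewrite author's own statement) =====
-- stated objective: faster
-- what changed: Instead of rescanning all of from_data for every to_id, B extracts (key-value, from_id) pairs in one comprehension, groups them into a dict with one setdefault pass, and assigns each to_id its group by a single lookup while iterating to_data.items().
import Mathlib
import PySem

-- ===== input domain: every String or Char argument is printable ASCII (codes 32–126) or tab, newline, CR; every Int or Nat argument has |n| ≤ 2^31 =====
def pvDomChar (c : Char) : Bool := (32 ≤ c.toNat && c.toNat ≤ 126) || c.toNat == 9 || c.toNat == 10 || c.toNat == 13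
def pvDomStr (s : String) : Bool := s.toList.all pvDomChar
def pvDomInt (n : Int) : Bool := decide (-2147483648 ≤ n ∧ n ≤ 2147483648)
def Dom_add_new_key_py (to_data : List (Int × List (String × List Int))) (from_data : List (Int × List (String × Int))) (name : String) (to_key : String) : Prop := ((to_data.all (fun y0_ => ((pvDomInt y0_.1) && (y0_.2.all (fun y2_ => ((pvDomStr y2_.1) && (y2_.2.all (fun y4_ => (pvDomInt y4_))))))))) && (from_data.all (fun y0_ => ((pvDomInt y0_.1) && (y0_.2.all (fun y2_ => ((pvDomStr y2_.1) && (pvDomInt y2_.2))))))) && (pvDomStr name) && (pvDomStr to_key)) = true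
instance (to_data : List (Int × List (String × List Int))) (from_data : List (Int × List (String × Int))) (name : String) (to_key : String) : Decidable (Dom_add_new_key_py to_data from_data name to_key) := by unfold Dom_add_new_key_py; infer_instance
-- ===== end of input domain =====

-- B replaces A's rescan of from_data per to_id by one pair-extracting comprehension + one grouping
-- pass + one assignment pass (asymptotically faster).
-- NOTE: the Python A mutates to_data in place (B performs the same mutation); the equivalence proved
-- here is about the return value.

-- ===== PORT A =====
-- keys = []; for from_id in from_data: if to_key in from_data[from_id]: if from_data[from_id][to_key] == to_id: keys.append(from_id)
def aKeys (from_data : List (Int × List (String × Int))) (to_key : String) (to_id : Int) : List Int :=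
  (from_data.map Prod.fst).foldl (fun ks from_id =>
    match (PySem.Dict.mk from_data).get? from_id with
    | some d =>
      if (PySem.Dict.mk d).contains to_key then
        if (PySem.Dict.mk d).get? to_key = some to_id then ks ++ [from_id] else ks
      else ks
    | none => ks) []   -- none unreachable: from_id is drawn from from_data's keys

-- to_data[to_id][name] = keys, on the assoc-list model (set the inner dict of the first pair whose key is to_id)
def aSet (td : List (Int × List (String × List Int))) (to_id : Int) (name : String) (keys : List Int) : List (Int × List (String × List Int)) :=
  match td with
  | [] => []
  | (k, d) :: rest =>
    if k == to_id then (k, (PySem.Dict.insert (PySem.Dict.mk d) name keys).items) :: rest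
    else (k, d) :: aSet rest to_id name keys

def add_new_key_py (to_data : List (Int × List (String × List Int))) (from_data : List (Int × List (String × Int))) (name : String) (to_key : String) : List (Int × List (String × List Int)) :=
  (to_data.map Prod.fst).foldl (fun td to_id =>
    aSet td to_id name (aKeys from_data to_key to_id)) to_data

-- ===== PORT B =====
-- pairs = [(d[to_key], fid) for fid, d in from_data.items() if to_key in d]
def bPairs (from_data : List (Int × List (String × Int))) (to_key : String) : List (Int × Int) :=
  from_data.flatMap (fun p =>
    match (PySem.Dict.mk p.2).get? to_key with   -- 'to_key in d' then 'd[to_key]' in one Option match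
    | some v => [(v, p.1)]
    | none => [])

-- groups = {}; for v, fid in pairs: groups.setdefault(v, []).append(fid)
def bGroups (pairs : List (Int × Int)) : PySem.Dict Int (List Int) :=
  pairs.foldl (fun g q => g.modify q.1 [] (· ++ [q.2])) PySem.Dict.empty

-- for to_id, d in to_data.items(): d[name] = groups.get(to_id, [])
def add_new_key_py_alt (to_data : List (Int × List (String × List Int))) (from_data : List (Int × List (String × Int))) (name : String) (to_key : String) : List (Int × List (String × List Int)) :=
  let groups := bGroups (bPairs from_data to_key)
  to_data.map (fun p => (p.1, (PySem.Dict.insert (PySem.Dict.mk p.2) name (groups.getD p.1 [])).items))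

-- ===== PRECONDITION & SPEC =====
-- Pre_ requires the outer association lists to have pairwise-distinct keys: they model Python dicts,
-- which cannot hold duplicate keys, so no input the Python A actually receives is excluded.
def Pre_add_new_key_py (to_data : List (Int × List (String × List Int))) (from_data : List (Int × List (String × Int))) (name : String) (to_key : String) : Prop :=
  (to_data.map Prod.fst).Nodup ∧ (from_data.map Prod.fst).Nodup
instance (to_data : List (Int × List (String × List Int))) (from_data : List (Int × List (String × Int))) (name : String) (to_key : String) : Decidable (Pre_add_new_key_py to_data from_data name to_key) := by unfold Pre_add_new_key_py; infer_instance

def pvWitness_add_new_key_py : (List (Int × List (String × List Int))) × (List (Int × List (String × Int))) × String × String :=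
  ([(1, [("a", [2])]), (2, [])], [(7, [("k", 1)]), (8, [("k", 2), ("x", 0)])], "n", "k")

def Spec_add_new_key_py (to_data : List (Int × List (String × List Int))) (from_data : List (Int × List (String × Int))) (name : String) (to_key : String) (out : List (Int × List (String × List Int))) : Prop := out = add_new_key_py_alt to_data from_data name to_key
instance (to_data : List (Int × List (String × List Int))) (from_data : List (Int × List (String × Int))) (name : String) (to_key : String) (out : List (Int × List (String × List Int))) : Decidable (Spec_add_new_key_py to_data from_data name to_key out) := by unfold Spec_add_new_key_py; infer_instance

-- ===== CLAIM (what is proved, stated in full; the proofs are below) =====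
def Claim_equal_add_new_key_py : Prop := ∀ (to_data : List (Int × List (String × List Int))) (from_data : List (Int × List (String × Int))) (name : String) (to_key : String), Dom_add_new_key_py to_data from_data name to_key → Pre_add_new_key_py to_data from_data name to_key → Spec_add_new_key_py to_data from_data name to_key (add_new_key_py to_data from_data name to_key)

-- ===== LEMMAS AND PROOFS =====

-- A's inner loop is an append-filter over from_data's keys (generalized over the accumulator)
lemma aKeys_aux (from_data : List (Int × List (String × Int))) (to_key : String) (to_id : Int) :
    ∀ (l : List Int) (ks : List Int),
      (l.foldl (fun ks from_id =>
        match (PySem.Dict.mk from_data).get? from_id with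
        | some d =>
          if (PySem.Dict.mk d).contains to_key then
            if (PySem.Dict.mk d).get? to_key = some to_id then ks ++ [from_id] else ks
          else ks
        | none => ks) ks)
      = ks ++ l.filter (fun from_id =>
          match (PySem.Dict.mk from_data).get? from_id with
          | some d => (PySem.Dict.mk d).get? to_key == some to_id
          | none => false) := by
  intro l
  induction l with
  | nil => intro ks; simp
  | cons x xs ih =>
    intro ks
    simp only [List.foldl_cons, List.filter_cons]
    rw [ih]
    cases hx : (PySem.Dict.mk from_data).get? x with
    | none => simp
    | some d =>
      by_cases hc : (PySem.Dict.mk d).contains to_key = true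
      · by_cases he : (PySem.Dict.mk d).get? to_key = some to_id
        · simp [hc, he]
        · simp [hc, he]
      · have hc' : (PySem.Dict.mk d).contains to_key = false := by
          revert hc; cases (PySem.Dict.mk d).contains to_key <;> simp
        have hn : (PySem.Dict.mk d).get? to_key = none :=
          (PySem.Dict.get?_eq_none_iff_contains _ _).mpr hc'
        simp [hc', hn]

-- with distinct from_data keys, A's filter over KEYS equals B's pair comprehension filtered at to_id
lemma keys_agree (to_key : String) (to_id : Int) :
    ∀ (from_data : List (Int × List (String × Int))), (from_data.map Prod.fst).Nodup →
      aKeys from_data to_key to_id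
      = ((bPairs from_data to_key).filter (fun q => q.1 == to_id)).map Prod.snd := by
  intro fd
  induction fd with
  | nil => intro _; simp [aKeys, bPairs]
  | cons p rest ih =>
    intro hnd
    simp only [List.map_cons, List.nodup_cons] at hnd
    obtain ⟨hx, hrest⟩ := hnd
    unfold aKeys bPairs
    simp only [List.map_cons, List.flatMap_cons]
    rw [aKeys_aux, List.nil_append, List.filter_cons, List.filter_append, List.map_append]
    have hhead : (PySem.Dict.mk (p :: rest)).get? p.1 = some p.2 := by
      rw [PySem.Dict.get?_mk_cons]; simp
    have htail : ∀ x ∈ rest.map Prod.fst,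
        (PySem.Dict.mk (p :: rest)).get? x = (PySem.Dict.mk rest).get? x := by
      intro x hxm
      rw [PySem.Dict.get?_mk_cons]
      have : ¬ (p.1 == x) = true := by
        simp only [beq_iff_eq]; intro h; exact hx (h ▸ hxm)
      simp [this]
    have hfilter : (rest.map Prod.fst).filter (fun from_id =>
          match (PySem.Dict.mk (p :: rest)).get? from_id with
          | some d => (PySem.Dict.mk d).get? to_key == some to_id
          | none => false)
        = (rest.map Prod.fst).filter (fun from_id =>
          match (PySem.Dict.mk rest).get? from_id with
          | some d => (PySem.Dict.mk d).get? to_key == some to_id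
          | none => false) := by
      apply List.filter_congr
      intro x hxm
      rw [htail x hxm]
    have hih := ih hrest
    unfold aKeys at hih
    rw [aKeys_aux, List.nil_append] at hih
    unfold bPairs at hih
    rw [hhead, hfilter, hih]
    cases hv : (PySem.Dict.mk p.2).get? to_key with
    | none => simp [hv]
    | some v =>
      by_cases hvt : v = to_id
      · simp [hv, hvt]
      · simp [hv, hvt]

-- B's grouping dict read back at to_id is the filtered pair list (PySem grouping-loop lemma)
lemma bGroups_getD (pairs : List (Int × Int)) (to_id : Int) :
    (bGroups pairs).getD to_id [] = ((pairs.filter (fun q => q.1 == to_id)).map Prod.snd) := by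
  unfold bGroups
  rw [PySem.Dict.getD_foldl_modify_append]
  simp [PySem.Dict.getD_empty]

-- aSet at a key absent from the iterated list commutes with a cons whose key is not iterated
lemma foldl_aSet_cons (name : String) (K : Int → List Int) :
    ∀ (l : List Int) (hd : Int × List (String × List Int)) (td : List (Int × List (String × List Int))),
      hd.1 ∉ l →
      l.foldl (fun td t => aSet td t name (K t)) (hd :: td)
      = hd :: l.foldl (fun td t => aSet td t name (K t)) td := by
  intro l
  induction l with
  | nil => intro _ _ _; simp
  | cons x xs ih =>
    intro hd td hmem
    obtain ⟨hk, hdict⟩ := hd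
    simp only [List.mem_cons, not_or] at hmem
    obtain ⟨hne, hxs⟩ := hmem
    simp only [List.foldl_cons]
    have hset : aSet ((hk, hdict) :: td) x name (K x) = (hk, hdict) :: aSet td x name (K x) := by
      rw [aSet]
      simp [hne]
    rw [hset, ih _ _ hxs]

-- with distinct to_data keys, A's fold of in-place updates over to_data's keys is a map over its items
lemma foldl_aSet_eq_map (name : String) (K : Int → List Int) :
    ∀ (td : List (Int × List (String × List Int))), (td.map Prod.fst).Nodup →
      (td.map Prod.fst).foldl (fun acc t => aSet acc t name (K t)) td
      = td.map (fun p => (p.1, (PySem.Dict.insert (PySem.Dict.mk p.2) name (K p.1)).items)) := by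
  intro td
  induction td with
  | nil => intro _; simp
  | cons p rest ih =>
    intro hnd
    simp only [List.map_cons, List.nodup_cons] at hnd
    obtain ⟨hx, hrest⟩ := hnd
    simp only [List.map_cons, List.foldl_cons]
    have h1 : aSet (p :: rest) p.1 name (K p.1)
        = (p.1, (PySem.Dict.insert (PySem.Dict.mk p.2) name (K p.1)).items) :: rest := by
      unfold aSet; simp
    rw [h1, foldl_aSet_cons name K (rest.map Prod.fst)
      (p.1, (PySem.Dict.insert (PySem.Dict.mk p.2) name (K p.1)).items) rest hx, ih hrest]

-- ===== VERDICT (by name: the statement is the Claim_ definition above) =====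
theorem add_new_key_py_spec : Claim_equal_add_new_key_py := by
  intro to_data from_data name to_key _ hpre
  obtain ⟨hto, hfrom⟩ := hpre
  unfold Spec_add_new_key_py add_new_key_py add_new_key_py_alt
  rw [foldl_aSet_eq_map name _ to_data hto]
  simp only [bGroups_getD, keys_agree to_key _ from_data hfrom]
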